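/- GENERATED by tools/from_farm_form.py from prooffarm-gif/accepted/DGifDecompressInput.2/Proof.lean (a worked proof of the farm's unit `DGifDecompressInput.2`,
   accepted by the verdict) — do not edit. -/
import Gif.Spec.Units.DGifDecompressInput_2
import Gif.Spec.AllSegs
import Gif.Spec.Proved.DGifDecompressInput_2_Lemmas

open X86 X86.User Asan ProgX.Base ProgX.Base.Spec Gif.Spec

/-!
  `DGifDecompressInput.2` (0x106807 … 0x10685e, 24 instructions; dgif_lib.c:1083-1091): ONE ROUND OF THE FILL LOOP of a protected
  function, with the contract call `DGifBufferedInput(gif, Private->Buf, &NextByte)` in the middle. The call's return address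
  0x106829 (`ret4`) is not a cut of the design, so the unit makes it one of its own: a private assertion `di2_AtRet4` (`Body` + what
  is live there) and two walks (Lemmas.lean), chained here.
-/

/-- Segment 2 of `DGifDecompressInput` takes `Head m` at 0x106807 to `Head m'` (`m' < m`) at 0x106807, to `Tail` at 0x10688e (the
loop's test failed) or to `Done` at 0x106874 (DGifBufferedInput failed). -/
theorem Gif.Spec.Proved.DGifDecompressInput_2_ok : Gif.Spec.DGifDecompressInput_2.Statement := by
  intro Lay hLay μ hμ u₀ hcode h_DGifBufferedInput h_asan_load4_noabort h_asan_load8_noabort H rest frames F R e ret m v hat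
  -- the callee's contract for the frame list of the body (the own frame in front)
  have hbi := h_DGifBufferedInput H rest (DGifDecompressInput.framesIn frames e) F R
  -- 0x106807 … 0x10688e (`Tail`) | the call … 0x106829
  refine (Gif.Spec.DGifDecompressInput_2.di2_seg_head Lay hLay μ hμ u₀ hcode H rest frames F R e ret m hbi
    h_asan_load4_noabort v hat).trans ?_
  intro v1 hv1
  rcases hv1 with htail | hret4
  · -- the loop's test failed: `Tail`
    exact ReachVia.done (Or.inr (Or.inl htail))
  · -- 0x106829 … 0x106874 (`Done`) | 0x106807 (`Head` with a smaller measure)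
    refine ReachVia.mono (Gif.Spec.DGifDecompressInput_2.di2_seg_tail Lay hLay μ hμ u₀ hcode H rest frames F R e ret m
      h_asan_load4_noabort h_asan_load8_noabort v1 hret4) ?_
    intro w hw
    rcases hw with hhead | hdone
    · exact Or.inl hhead
    · exact Or.inr (Or.inr hdone)
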